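-- pv_equiv track=rewrite | github.com/wan-catherine/Leetcode | problems/N1537_Get_The_Maximum_Score.py | maxSum_20250323
-- ===== SOURCE A (Python) =====
-- from typing import List
--
-- def maxSum_20250323(nums1: List[int], nums2: List[int]) -> int:
--     lf, ls = len(nums1), len(nums2)
--     points = []
--     i, j = 0, 0
--     while i < lf and j < ls:
--         if nums1[i] == nums2[j]:
--             points.append([i, j])
--             i += 1
--             j += 1
--         elif nums1[i] < nums2[j]:
--             i += 1
--         else:
--             j += 1
--     if len(points) == 0:
--         return max(sum(nums1), sum(nums2))
--     cur = 0
--     pi, pj = -1, -1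
--     for i, j in points:
--         piv, pjv = sum(nums1[pi+1:i]), sum(nums2[pj+1:j])
--         cur += max(piv, pjv)
--         cur += nums1[i]
--         pi, pj = i, j
--     cur += max(sum(nums1[pi+1:]), sum(nums2[pj+1:]))
--     return cur
-- ===== SOURCE B (Python) =====
-- from typing import List
--
-- def maxSum_20250323(nums1: List[int], nums2: List[int]) -> int:
--     lf, ls = len(nums1), len(nums2)
--     i = j = 0
--     sum1 = sum2 = result = 0
--     while i < lf and j < ls:
--         a, b = nums1[i], nums2[j]
--         if a < b:
--             sum1 += a
--             i += 1
--         elif b < a: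
--             sum2 += b
--             j += 1
--         else:
--             result += max(sum1, sum2) + a
--             sum1 = sum2 = 0
--             i += 1
--             j += 1
--     sum1 += sum(nums1[i:])
--     sum2 += sum(nums2[j:])
--     return result + max(sum1, sum2)
-- ===== Notes on version B (the rewrite author's own statement) =====
-- stated objective: simpler
-- what changed: Replaced A's two-phase algorithm (collect a list of crossing points, then a second pass re-summing segments via list slices) by a single-pass two-pointer merge that keeps running segment sums and folds the answer as it goes, so the points list and all slicing disappear.
import Mathlib
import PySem

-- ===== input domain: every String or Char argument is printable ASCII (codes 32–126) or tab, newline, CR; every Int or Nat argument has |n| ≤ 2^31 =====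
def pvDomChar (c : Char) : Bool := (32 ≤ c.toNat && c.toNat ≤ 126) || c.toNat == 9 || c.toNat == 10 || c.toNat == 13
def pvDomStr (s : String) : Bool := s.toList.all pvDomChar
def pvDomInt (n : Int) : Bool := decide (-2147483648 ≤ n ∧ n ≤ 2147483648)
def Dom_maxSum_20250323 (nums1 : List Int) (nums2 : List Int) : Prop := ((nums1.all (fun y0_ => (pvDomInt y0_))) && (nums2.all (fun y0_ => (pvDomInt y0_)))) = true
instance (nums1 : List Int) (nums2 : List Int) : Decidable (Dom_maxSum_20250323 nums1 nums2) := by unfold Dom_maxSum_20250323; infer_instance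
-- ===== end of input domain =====

-- B replaces A's two-phase points-list-and-slices algorithm by a single-pass merge with
-- running segment sums (objective: simpler, O(1) extra space instead of the points list).

-- ===== PORT A =====
-- A's first while loop: collect the crossing points (i, j) with nums1[i] == nums2[j].
def collectA (nums1 : List Int) (nums2 : List Int) (i j : Nat) (points : List (Nat × Nat)) : List (Nat × Nat) :=
  if h : i < nums1.length ∧ j < nums2.length then
    if nums1.getD i 0 = nums2.getD j 0 then
      collectA nums1 nums2 (i + 1) (j + 1) (points ++ [(i, j)])
    else if nums1.getD i 0 < nums2.getD j 0 then
      collectA nums1 nums2 (i + 1) j points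
    else
      collectA nums1 nums2 i (j + 1) points
  else points
termination_by (nums1.length - i) + (nums2.length - j)
decreasing_by all_goals omega

-- A's for-loop body over the points: state is (cur, pi, pj); slices are Python slices.
def stepA (nums1 : List Int) (nums2 : List Int) (s : Int × Int × Int) (p : Nat × Nat) : Int × Int × Int :=
  let piv := (PySem.List.slice nums1 (some (s.2.1 + 1)) (some (p.1 : Int))).sum
  let pjv := (PySem.List.slice nums2 (some (s.2.2 + 1)) (some (p.2 : Int))).sum
  (s.1 + max piv pjv + nums1.getD p.1 0, ((p.1 : Int), (p.2 : Int)))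

def maxSum_20250323 (nums1 : List Int) (nums2 : List Int) : Int :=
  let points := collectA nums1 nums2 0 0 []
  if points.length = 0 then max nums1.sum nums2.sum
  else
    let r := points.foldl (stepA nums1 nums2) (0, (-1, -1))
    r.1 + max (PySem.List.slice nums1 (some (r.2.1 + 1)) none).sum
              (PySem.List.slice nums2 (some (r.2.2 + 1)) none).sum

-- ===== PORT B =====
-- B's single while loop: two pointers, running segment sums s1/s2, accumulator res.
def loopB (nums1 : List Int) (nums2 : List Int) (i j : Nat) (s1 s2 res : Int) : Int :=
  if h : i < nums1.length ∧ j < nums2.length then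
    if nums1.getD i 0 < nums2.getD j 0 then loopB nums1 nums2 (i + 1) j (s1 + nums1.getD i 0) s2 res
    else if nums2.getD j 0 < nums1.getD i 0 then loopB nums1 nums2 i (j + 1) s1 (s2 + nums2.getD j 0) res
    else loopB nums1 nums2 (i + 1) (j + 1) 0 0 (res + max s1 s2 + nums1.getD i 0)
  else res + max (s1 + (nums1.drop i).sum) (s2 + (nums2.drop j).sum)
termination_by (nums1.length - i) + (nums2.length - j)
decreasing_by all_goals omega

def maxSum_20250323_alt (nums1 : List Int) (nums2 : List Int) : Int :=
  loopB nums1 nums2 0 0 0 0 0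

-- ===== PRECONDITION & SPEC =====
def Spec_maxSum_20250323 (nums1 : List Int) (nums2 : List Int) (out : Int) : Prop := out = maxSum_20250323_alt nums1 nums2
instance (nums1 : List Int) (nums2 : List Int) (out : Int) : Decidable (Spec_maxSum_20250323 nums1 nums2 out) := by unfold Spec_maxSum_20250323; infer_instance

-- ===== CLAIM (what is proved, stated in full; the proofs are below) =====
def Claim_equal_maxSum_20250323 : Prop := ∀ (nums1 : List Int) (nums2 : List Int), Dom_maxSum_20250323 nums1 nums2 → Spec_maxSum_20250323 nums1 nums2 (maxSum_20250323 nums1 nums2)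

-- ===== LEMMAS AND PROOFS =====

-- one-step unfolding lemmas for collectA
theorem collectA_stop (nums1 nums2 : List Int) (i j : Nat) (acc : List (Nat × Nat))
    (h : ¬ (i < nums1.length ∧ j < nums2.length)) :
    collectA nums1 nums2 i j acc = acc := by
  rw [collectA, dif_neg h]

theorem collectA_eq (nums1 nums2 : List Int) (i j : Nat) (acc : List (Nat × Nat))
    (h : i < nums1.length ∧ j < nums2.length) (heq : nums1.getD i 0 = nums2.getD j 0) :
    collectA nums1 nums2 i j acc = collectA nums1 nums2 (i + 1) (j + 1) (acc ++ [(i, j)]) := by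
  rw [collectA, dif_pos h, if_pos heq]

theorem collectA_lt (nums1 nums2 : List Int) (i j : Nat) (acc : List (Nat × Nat))
    (h : i < nums1.length ∧ j < nums2.length) (hlt : nums1.getD i 0 < nums2.getD j 0) :
    collectA nums1 nums2 i j acc = collectA nums1 nums2 (i + 1) j acc := by
  rw [collectA, dif_pos h, if_neg (by omega), if_pos hlt]

theorem collectA_gt (nums1 nums2 : List Int) (i j : Nat) (acc : List (Nat × Nat))
    (h : i < nums1.length ∧ j < nums2.length) (hgt : nums2.getD j 0 < nums1.getD i 0) :
    collectA nums1 nums2 i j acc = collectA nums1 nums2 i (j + 1) acc := by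
  rw [collectA, dif_pos h, if_neg (by omega), if_neg (by omega)]

-- collectA's accumulator prepends.
theorem collectA_acc_fuel (nums1 nums2 : List Int) :
    ∀ n i j (acc : List (Nat × Nat)), (nums1.length - i) + (nums2.length - j) ≤ n →
    collectA nums1 nums2 i j acc = acc ++ collectA nums1 nums2 i j [] := by
  intro n
  induction n with
  | zero =>
      intro i j acc hn
      have hg : ¬ (i < nums1.length ∧ j < nums2.length) := by omega
      rw [collectA_stop nums1 nums2 i j acc hg, collectA_stop nums1 nums2 i j [] hg]
      simp
  | succ n ih =>
      intro i j acc hn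
      by_cases hg : i < nums1.length ∧ j < nums2.length
      · rcases eq_or_ne (nums1.getD i 0) (nums2.getD j 0) with heq | hne
        · rw [collectA_eq nums1 nums2 i j acc hg heq, collectA_eq nums1 nums2 i j [] hg heq,
              ih (i + 1) (j + 1) (acc ++ [(i, j)]) (by omega),
              ih (i + 1) (j + 1) ([] ++ [(i, j)]) (by omega)]
          simp
        · rcases lt_or_gt_of_ne hne with hlt | hgt
          · rw [collectA_lt nums1 nums2 i j acc hg hlt, collectA_lt nums1 nums2 i j [] hg hlt]
            exact ih (i + 1) j acc (by omega)
          · rw [collectA_gt nums1 nums2 i j acc hg hgt, collectA_gt nums1 nums2 i j [] hg hgt]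
            exact ih i (j + 1) acc (by omega)
      · rw [collectA_stop nums1 nums2 i j acc hg, collectA_stop nums1 nums2 i j [] hg]
        simp

theorem collectA_acc (nums1 nums2 : List Int) (i j : Nat) (acc : List (Nat × Nat)) :
    collectA nums1 nums2 i j acc = acc ++ collectA nums1 nums2 i j [] :=
  collectA_acc_fuel nums1 nums2 ((nums1.length - i) + (nums2.length - j)) i j acc (le_refl _)

-- segment sum of xs[i0:i] extended by one element xs[i]
theorem seg_extend (xs : List Int) (i0 i : Nat) (h0 : i0 ≤ i) (h : i < xs.length) :
    (((xs.drop i0).take (i + 1 - i0)).sum : Int)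
      = ((xs.drop i0).take (i - i0)).sum + xs.getD i 0 := by
  have h1 : i + 1 - i0 = (i - i0) + 1 := by omega
  rw [h1, List.take_add_one]
  have h2 : (xs.drop i0)[i - i0]? = xs[i]? := by
    rw [List.getElem?_drop]
    congr 1
    omega
  rw [List.sum_append, h2, List.getElem?_eq_getElem h]
  simp [List.getD_eq_getElem?_getD, List.getElem?_eq_getElem h]

-- segment sum of xs[i0:i] plus the tail xs[i:] is the tail xs[i0:]
theorem seg_split (xs : List Int) (i0 i : Nat) (h0 : i0 ≤ i) :
    (((xs.drop i0).take (i - i0)).sum : Int) + (xs.drop i).sum = (xs.drop i0).sum := by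
  have h1 : (xs.drop i0).drop (i - i0) = xs.drop i := by
    rw [List.drop_drop]
    congr 1
    omega
  calc ((xs.drop i0).take (i - i0)).sum + (xs.drop i).sum
      = ((xs.drop i0).take (i - i0)).sum + ((xs.drop i0).drop (i - i0)).sum := by rw [h1]
    _ = ((xs.drop i0).take (i - i0) ++ (xs.drop i0).drop (i - i0)).sum := (List.sum_append ..).symm
    _ = (xs.drop i0).sum := by rw [List.take_append_drop]

theorem drop_clamp (xs : List Int) (k : Nat) :
    xs.drop (PySem.List.clampIdx xs.length (k : Int)) = xs.drop k := by
  rw [PySem.List.clampIdx_natCast]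
  rcases le_total k xs.length with h | h
  · rw [min_eq_left h]
  · rw [min_eq_right h, List.drop_eq_nil_of_le h, List.drop_eq_nil_of_le (le_refl _)]

-- A's second phase (fold over the remaining points, then the final tail term),
-- started with cur = res and pi = i0 - 1, pj = j0 - 1.
def finishA (nums1 nums2 : List Int) (pts : List (Nat × Nat)) (res : Int) (i0 j0 : Nat) : Int :=
  (pts.foldl (stepA nums1 nums2) (res, ((i0 : Int) - 1, (j0 : Int) - 1))).1
    + max (PySem.List.slice nums1
        (some ((pts.foldl (stepA nums1 nums2) (res, ((i0 : Int) - 1, (j0 : Int) - 1))).2.1 + 1)) none).sum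
      (PySem.List.slice nums2
        (some ((pts.foldl (stepA nums1 nums2) (res, ((i0 : Int) - 1, (j0 : Int) - 1))).2.2 + 1)) none).sum

theorem finishA_nil (nums1 nums2 : List Int) (res : Int) (i0 j0 : Nat) :
    finishA nums1 nums2 [] res i0 j0
      = res + max (nums1.drop i0).sum (nums2.drop j0).sum := by
  unfold finishA
  simp only [List.foldl_nil]
  have e1 : ((i0 : Int) - 1 + 1) = ((i0 : Nat) : Int) := by ring
  have e2 : ((j0 : Int) - 1 + 1) = ((j0 : Nat) : Int) := by ring
  rw [e1, e2, PySem.List.slice_some_none, PySem.List.slice_some_none, drop_clamp, drop_clamp]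

-- the main invariant: B's loop equals A's second phase restarted at (i, j), where
-- s1/s2 are the sums of the segments walked since the last crossing point (i0, j0).
theorem key (nums1 nums2 : List Int) :
    ∀ n i j i0 j0 (s1 s2 res : Int),
    (nums1.length - i) + (nums2.length - j) ≤ n →
    i0 ≤ i → j0 ≤ j →
    s1 = ((nums1.drop i0).take (i - i0)).sum →
    s2 = ((nums2.drop j0).take (j - j0)).sum →
    loopB nums1 nums2 i j s1 s2 res
      = finishA nums1 nums2 (collectA nums1 nums2 i j []) res i0 j0 := by
  intro n
  induction n with
  | zero =>
      intro i j i0 j0 s1 s2 res hn h0 h0' hs1 hs2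
      have hg : ¬ (i < nums1.length ∧ j < nums2.length) := by omega
      rw [loopB, dif_neg hg, collectA_stop nums1 nums2 i j [] hg, finishA_nil,
          hs1, hs2, seg_split nums1 i0 i h0, seg_split nums2 j0 j h0']
  | succ n ih =>
      intro i j i0 j0 s1 s2 res hn h0 h0' hs1 hs2
      by_cases hg : i < nums1.length ∧ j < nums2.length
      · rcases lt_trichotomy (nums1.getD i 0) (nums2.getD j 0) with hlt | heq | hgt
        · -- nums1[i] < nums2[j]
          rw [loopB, dif_pos hg, if_pos hlt, collectA_lt nums1 nums2 i j [] hg hlt]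
          exact ih (i + 1) j i0 j0 _ _ res (by omega) (by omega) h0'
            (by rw [hs1, seg_extend nums1 i0 i h0 hg.1]) hs2
        · -- equal: crossing point
          rw [loopB, dif_pos hg, if_neg (by omega), if_neg (by omega),
              collectA_eq nums1 nums2 i j [] hg heq,
              collectA_acc nums1 nums2 (i + 1) (j + 1) ([] ++ [(i, j)])]
          rw [ih (i + 1) (j + 1) (i + 1) (j + 1) 0 0 (res + max s1 s2 + nums1.getD i 0)
              (by omega) (le_refl _) (le_refl _) (by simp) (by simp)]
          unfold finishA
          simp only [List.nil_append, List.cons_append, List.foldl_cons]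
          have hstep : stepA nums1 nums2 (res, ((i0 : Int) - 1, (j0 : Int) - 1)) (i, j)
              = (res + max s1 s2 + nums1.getD i 0,
                 (((i + 1 : Nat) : Int) - 1, ((j + 1 : Nat) : Int) - 1)) := by
            simp only [stepA]
            have e1 : ((i0 : Int) - 1 + 1) = ((i0 : Nat) : Int) := by ring
            have e2 : ((j0 : Int) - 1 + 1) = ((j0 : Nat) : Int) := by ring
            rw [e1, e2, PySem.List.slice_natCast, PySem.List.slice_natCast, ← hs1, ← hs2]
            refine Prod.ext rfl (Prod.ext ?_ ?_) <;> push_cast <;> ring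
          rw [hstep]
        · -- nums1[i] > nums2[j]
          rw [loopB, dif_pos hg, if_neg (by omega), if_pos hgt,
              collectA_gt nums1 nums2 i j [] hg hgt]
          exact ih i (j + 1) i0 j0 _ _ res (by omega) h0 (by omega) hs1
            (by rw [hs2, seg_extend nums2 j0 j h0' hg.2])
      · rw [loopB, dif_neg hg, collectA_stop nums1 nums2 i j [] hg, finishA_nil,
            hs1, hs2, seg_split nums1 i0 i h0, seg_split nums2 j0 j h0']

-- ===== VERDICT (by name: the statement is the Claim_ definition above) =====
theorem maxSum_20250323_spec : Claim_equal_maxSum_20250323 := by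
  intro nums1 nums2 _hdom
  unfold Spec_maxSum_20250323 maxSum_20250323 maxSum_20250323_alt
  have hkey := key nums1 nums2 (nums1.length + nums2.length) 0 0 0 0 0 0 0 (by omega)
    (le_refl _) (le_refl _) (by simp) (by simp)
  rw [hkey]
  by_cases hnil : (collectA nums1 nums2 0 0 []).length = 0
  · rw [List.length_eq_zero_iff] at hnil
    rw [hnil, finishA_nil]
    simp
  · simp only [if_neg hnil]
    unfold finishA
    norm_num
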